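-- pv_equiv track=rewrite | github.com/linyc74/lstm_dna | lstm_dna/annotate.py | prediction_to_regions
-- ===== SOURCE A (Python) =====
-- from typing import List, Tuple, Optional
--
-- def prediction_to_regions(
--         prediction: List[bool]) -> List[Tuple[int, int]]:
--
--     regions = []
--
--     is_plus = False
--     start, end = None, None
--     for i in range(len(prediction)):
--
--         see_start = not is_plus and prediction[i]
--         see_end = is_plus and not prediction[i]
--
--         if see_start:
--             is_plus = True
--             start = i + 1
--
--         elif see_end:
--             is_plus = False
--             end = i
--             assert start and end
--             assert end >= start
--             regions.append((start, end))
--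
--     if is_plus:
--         regions.append((start, len(prediction)))
--
--     return regions
-- ===== SOURCE B (Python) =====
-- from itertools import groupby
-- from typing import List, Tuple
--
-- def prediction_to_regions(prediction: List[bool]) -> List[Tuple[int, int]]:
--     regions = []
--     offset = 0
--     for value, group in groupby(prediction):
--         length = sum(1 for _ in group)
--         if value:
--             regions.append((offset + 1, offset + length))
--         offset += length
--     return regions
-- ===== Notes on version B (the rewrite author's own statement) =====
-- stated objective: simpler
-- what changed: Replaces the stateful start/end transition-detection loop (is_plus flag, asserts, trailing-region fixup) with itertools.groupby over maximal runs plus a running offset.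
import Mathlib
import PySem

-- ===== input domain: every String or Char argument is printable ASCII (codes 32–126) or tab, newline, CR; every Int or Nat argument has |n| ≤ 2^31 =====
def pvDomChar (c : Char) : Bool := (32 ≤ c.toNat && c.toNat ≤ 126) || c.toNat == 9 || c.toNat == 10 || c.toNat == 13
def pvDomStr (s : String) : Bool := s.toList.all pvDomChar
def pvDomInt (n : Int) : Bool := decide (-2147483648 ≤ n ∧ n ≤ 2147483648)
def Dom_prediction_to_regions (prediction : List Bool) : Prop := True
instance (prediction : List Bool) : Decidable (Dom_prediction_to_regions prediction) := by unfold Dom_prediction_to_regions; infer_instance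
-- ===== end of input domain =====

-- B replaces A's is_plus/start/end transition-detection loop with a run-length (groupby-style) scan; objective: simpler.

-- ===== PORT A =====
-- one iteration of A's for-loop; state = (regions, is_plus, start); start stays None until a region opens
-- (Python's asserts never fire for bool input: start = i+1 ≥ 1 and end ≥ start; they are not ported)
def aStep (p : List Bool) (st : List (Int × Int) × Bool × Option Int) (i : Int) :
    List (Int × Int) × Bool × Option Int :=
  let elem := (PySem.List.pyGet? p i).getD false   -- p[i]; i ∈ range(len(p)), so always in range
  let see_start := !st.2.1 && elem
  let see_end := st.2.1 && !elem
  if see_start then (st.1, true, some (i + 1))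
  else if see_end then (st.1 ++ [(st.2.2.getD 0, i)], false, st.2.2)
  else st

def prediction_to_regions (prediction : List Bool) : List (Int × Int) :=
  let s := (PySem.List.pyRange 0 (prediction.length : Int) 1).foldl (aStep prediction) ([], false, none)
  if s.2.1 then s.1 ++ [(s.2.2.getD 0, (prediction.length : Int))] else s.1

-- ===== PORT B =====
-- groupby loop of Source B: peel off the maximal run of the head value, emit a region if the value is true
def altGo (p : List Bool) (off : Int) : List (Int × Int) :=
  match p with
  | [] => []
  | b :: rest =>
    let len : Int := 1 + ((rest.takeWhile (· == b)).length : Int)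
    let tail := rest.dropWhile (· == b)
    let r := altGo tail (off + len)
    if b then (off + 1, off + len) :: r else r
termination_by p.length
decreasing_by
  exact Nat.lt_succ_of_le (List.length_dropWhile_le _ _)

def prediction_to_regions_alt (prediction : List Bool) : List (Int × Int) :=
  altGo prediction 0

-- ===== PRECONDITION & SPEC =====
def Spec_prediction_to_regions (prediction : List Bool) (out : List (Int × Int)) : Prop := out = prediction_to_regions_alt prediction
instance (prediction : List Bool) (out : List (Int × Int)) : Decidable (Spec_prediction_to_regions prediction out) := by unfold Spec_prediction_to_regions; infer_instance

-- ===== CLAIM (what is proved, stated in full; the proofs are below) =====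
def Claim_equal_prediction_to_regions : Prop := ∀ (prediction : List Bool), Dom_prediction_to_regions prediction → Spec_prediction_to_regions prediction (prediction_to_regions prediction)

-- ===== LEMMAS AND PROOFS =====

lemma altGo_nil (off : Int) : altGo [] off = [] := by rw [altGo.eq_def]

lemma altGo_cons (b : Bool) (r : List Bool) (off : Int) :
    altGo (b :: r) off =
      (if b then [(off + 1, off + (1 + ((r.takeWhile (· == b)).length : Int)))] else []) ++
        altGo (r.dropWhile (· == b)) (off + (1 + ((r.takeWhile (· == b)).length : Int))) := by
  rw [altGo.eq_def]
  cases b <;> simp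

-- B-side view of A's in-region state: finish the open region started at s0
def contTrue (p : List Bool) (off : Int) (s0 : Int) : List (Int × Int) :=
  match p with
  | [] => [(s0, off)]
  | true :: r => contTrue r (off + 1) s0
  | false :: r => (s0, off) :: altGo r (off + 1)

lemma altGo_false (r : List Bool) (off : Int) : altGo (false :: r) off = altGo r (off + 1) := by
  rw [altGo_cons]
  cases r with
  | nil => simp [altGo_nil]
  | cons b' r' =>
    cases b' with
    | true => simp
    | false =>
      rw [altGo_cons]
      simp only [List.takeWhile, List.dropWhile]
      norm_num
      congr 1
      push_cast
      ring

lemma contTrue_spec (p : List Bool) : ∀ (off s0 : Int),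
    contTrue p off s0 =
      (s0, off + ((p.takeWhile (· == true)).length : Int)) ::
        altGo (p.dropWhile (· == true)) (off + ((p.takeWhile (· == true)).length : Int)) := by
  induction p with
  | nil => intro off s0; simp [contTrue, altGo_nil]
  | cons b r ih =>
    intro off s0
    cases b with
    | true =>
      rw [contTrue, ih]
      simp only [List.takeWhile, List.dropWhile]
      norm_num
      constructor
      · push_cast; ring
      · congr 1; push_cast; ring
    | false =>
      rw [contTrue]
      simp only [List.takeWhile, List.dropWhile]
      norm_num
      exact (altGo_false r off).symm

lemma altGo_true (r : List Bool) (off : Int) :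
    altGo (true :: r) off = contTrue r (off + 1) (off + 1) := by
  rw [altGo_cons, contTrue_spec]
  norm_num
  constructor
  · push_cast; ring
  · congr 1; push_cast; ring

-- structural form of A's loop body and loop, carrying the current index explicitly
def loop2Step (st : List (Int × Int) × Bool × Option Int) (b : Bool) (off : Int) :
    List (Int × Int) × Bool × Option Int :=
  if !st.2.1 && b then (st.1, true, some (off + 1))
  else if st.2.1 && !b then (st.1 ++ [(st.2.2.getD 0, off)], false, st.2.2)
  else st

def loop2 : (List (Int × Int) × Bool × Option Int) → List Bool → Int → List (Int × Int) × Bool × Option Int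
  | st, [], _ => st
  | st, b :: r, off => loop2 (loop2Step st b off) r (off + 1)

-- A's postlude: close a still-open region at index n
def post (st : List (Int × Int) × Bool × Option Int) (n : Int) : List (Int × Int) :=
  if st.2.1 then st.1 ++ [(st.2.2.getD 0, n)] else st.1

-- the main invariant: A's loop from either flag state computes B's run decomposition
lemma main_inv (p : List Bool) :
    (∀ (off : Int) (regions : List (Int × Int)) (st? : Option Int),
      post (loop2 (regions, false, st?) p off) (off + (p.length : Int)) = regions ++ altGo p off) ∧
    (∀ (off : Int) (regions : List (Int × Int)) (s0 : Int),
      post (loop2 (regions, true, some s0) p off) (off + (p.length : Int)) = regions ++ contTrue p off s0) := by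
  induction p with
  | nil =>
    refine ⟨?_, ?_⟩ <;> intro off regions x
    · simp [loop2, post, altGo_nil]
    · simp [loop2, post, contTrue]
  | cons b r ih =>
    have harith : ∀ off : Int, off + ((b :: r).length : Int) = (off + 1) + (r.length : Int) := by
      intro off; simp [List.length_cons]; push_cast; ring
    refine ⟨?_, ?_⟩
    · intro off regions st?
      cases b with
      | true =>
        rw [loop2, altGo_true, harith]
        have hs : loop2Step (regions, false, st?) true off = (regions, true, some (off + 1)) := by
          simp [loop2Step]
        rw [hs]
        exact ih.2 (off + 1) regions (off + 1)
      | false =>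
        rw [loop2, altGo_false, harith]
        have hs : loop2Step (regions, false, st?) false off = (regions, false, st?) := by
          simp [loop2Step]
        rw [hs]
        exact ih.1 (off + 1) regions st?
    · intro off regions s0
      cases b with
      | true =>
        rw [loop2, contTrue, harith]
        have hs : loop2Step (regions, true, some s0) true off = (regions, true, some s0) := by
          simp [loop2Step]
        rw [hs]
        exact ih.2 (off + 1) regions s0
      | false =>
        rw [loop2, contTrue, harith]
        have hs : loop2Step (regions, true, some s0) false off
            = (regions ++ [(s0, off)], false, some s0) := by
          simp [loop2Step]
        rw [hs, ih.1 (off + 1) (regions ++ [(s0, off)]) (some s0), List.append_assoc]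
        rfl

-- bridge: A's foldl over pyRange with indexing equals loop2 on the corresponding suffix
lemma fold_eq_loop2 (full : List Bool) (p : List Bool) : ∀ (off : Int) st,
    0 ≤ off → full.drop off.toNat = p →
    (PySem.List.pyRange off (full.length : Int) 1).foldl (aStep full) st = loop2 st p off := by
  induction p with
  | nil =>
    intro off st h0 hd
    have hle : (full.length : Int) ≤ off := by
      by_contra h
      push_neg at h
      have : off.toNat < full.length := by omega
      simp [List.drop_eq_nil_iff] at hd
      omega
    have : PySem.List.pyRange off (full.length : Int) 1 = [] := by
      simp [PySem.List.pyRange]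
      omega
    simp [this, loop2]
  | cons b r ih =>
    intro off st h0 hd
    have hlt : off.toNat < full.length := by
      by_contra h
      push_neg at h
      simp [List.drop_eq_nil_iff.mpr h] at hd
    have hlt' : off < (full.length : Int) := by omega
    rw [PySem.List.pyRange_one_cons hlt', List.foldl_cons]
    have hget : full[off.toNat]? = some b := by
      have h' : (full.drop off.toNat)[0]? = some b := by rw [hd]; rfl
      simpa using h'
    have hstep : aStep full st off = loop2Step st b off := by
      have he : (PySem.List.pyGet? full off).getD false = b := by
        have h := PySem.List.pyGet?_of_nonneg full h0
        rw [h, hget]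
        rfl
      simp [aStep, loop2Step, he]
    rw [hstep, loop2]
    apply ih (off + 1) _ (by omega)
    have h1 : (off + 1).toNat = off.toNat + 1 := by omega
    rw [h1, ← List.drop_drop, hd]
    rfl

-- ===== VERDICT (by name: the statement is the Claim_ definition above) =====
theorem prediction_to_regions_spec : Claim_equal_prediction_to_regions := by
  intro p _
  unfold Spec_prediction_to_regions prediction_to_regions prediction_to_regions_alt
  have h1 := fold_eq_loop2 p p 0 ([], false, none) (le_refl 0) (by simp)
  have h2 := (main_inv p).1 0 [] none
  rw [show (0 : Int) + (p.length : Int) = (p.length : Int) by ring] at h2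
  simp only [h1]
  calc (if (loop2 ([], false, none) p 0).2.1 then
          (loop2 ([], false, none) p 0).1 ++ [((loop2 ([], false, none) p 0).2.2.getD 0, (p.length : Int))]
        else (loop2 ([], false, none) p 0).1)
      = post (loop2 ([], false, none) p 0) (p.length : Int) := rfl
    _ = [] ++ altGo p 0 := h2
    _ = altGo p 0 := by simp
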